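-- pv_equiv track=rewrite | github.com/welikeWatermelon/Algorithm | 프로그래머스/0/120902. 문자열 계산하기/문자열 계산하기.py | solution
-- ===== SOURCE A (Python) =====
-- def solution(my_string):
--     s_list=my_string.split()
--     sum_=int(s_list.pop(0))
-- #띄어쓰기를 기준으로 모두 리스트에 나누어 넣음 (숫자a개, 수식a-1개 )
-- #맨처음 숫자는 전역변수에넣음 -> 두자리 이상은 어떻게 해결할것인가 -> 띄어쓰기로!
-- #쓴 숫자는 리스트에서 지움 -> a-1개, a-1개
--
--     for i in range(0,len(s_list),2):
--         if s_list[i] == "+":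
--             sum_+=int(s_list[i+1])
--         else:
--             sum_-=int(s_list[i+1])
--     return sum_
-- ===== SOURCE B (Python) =====
-- def solution(my_string):
--     toks = my_string.split()
--     it = iter(toks[1:])
--     pairs = list(zip(it, it))  # (operator, operand) pairs
--
--     def ev(ps):
--         # divide-and-conquer evaluation of the signed terms; +/- associate, so split anywhere
--         if not ps:
--             return 0
--         if len(ps) == 1:
--             op, num = ps[0]
--             v = int(num)
--             return v if op == "+" else -v
--         mid = len(ps) // 2
--         return ev(ps[:mid]) + ev(ps[mid:])
--
--     return int(toks[0]) + ev(pairs)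
-- ===== Notes on version B (the rewrite author's own statement) =====
-- stated objective: alternative
-- what changed: A is a left-to-right accumulating loop over range(0, len, 2); B first zips the tokens after the head into (operator, operand) pairs and then evaluates them by divide-and-conquer recursion (split at the middle, add the halves), which is correct because + and - terms combine associatively.
import Mathlib
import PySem

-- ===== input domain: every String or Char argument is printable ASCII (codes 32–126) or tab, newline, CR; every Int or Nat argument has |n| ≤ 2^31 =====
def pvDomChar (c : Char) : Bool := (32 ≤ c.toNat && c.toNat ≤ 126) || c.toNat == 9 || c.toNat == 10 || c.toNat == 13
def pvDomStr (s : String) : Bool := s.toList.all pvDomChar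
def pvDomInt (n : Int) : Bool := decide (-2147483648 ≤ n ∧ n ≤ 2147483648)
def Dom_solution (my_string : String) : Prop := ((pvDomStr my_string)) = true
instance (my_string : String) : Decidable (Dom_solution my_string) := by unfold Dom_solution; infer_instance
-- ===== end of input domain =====

-- B replaces A's stride-2 accumulating index loop by zip-into-pairs followed by a
-- divide-and-conquer recursive evaluation of the signed terms; same O(n) cost.


-- ===== PORT A =====
-- s_list.pop(0) raises IndexError on an empty list, and s_list[i+1] / int(...) raise on an
-- even token count or a non-int number token: those inputs are excluded by Pre_solution,
-- so the total forms headD/tail/pyGetD/getD below are exact on Pre_solution.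
def solution (my_string : String) : Int :=
  let s_list := PySem.Str.split₀ my_string
  let sum0 : Int := (PySem.Int.ofStr? (s_list.headD "")).getD 0   -- sum_ = int(s_list.pop(0))
  let rest := s_list.tail                                          -- s_list after the pop
  (PySem.List.pyRange 0 (rest.length : Int) 2).foldl
    (fun sum_ i =>
      if PySem.List.pyGetD rest i "" = "+" then
        sum_ + (PySem.Int.ofStr? (PySem.List.pyGetD rest (i + 1) "")).getD 0
      else
        sum_ - (PySem.Int.ofStr? (PySem.List.pyGetD rest (i + 1) "")).getD 0)
    sum0

-- ===== PORT B =====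
-- pairs = list(zip(it, it)) over toks[1:]: consecutive (operator, operand) pairs,
-- a lone trailing token dropped, exactly as zip stops at the shorter exhaustion.
def pairUp : List String → List (String × String)
  | op :: num :: r => (op, num) :: pairUp r
  | _ => []

-- ev(ps): divide-and-conquer; ps[:mid] / ps[mid:] with mid = len(ps)//2 are take/drop.
def evPairs : List (String × String) → Int
  | [] => 0
  | [(op, num)] =>
      let v := (PySem.Int.ofStr? num).getD 0
      if op = "+" then v else -v
  | p :: q :: r =>
      let ps := p :: q :: r
      let mid := ps.length / 2
      evPairs (ps.take mid) + evPairs (ps.drop mid)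
termination_by ps => ps.length
decreasing_by
  · simp [List.length_take]; omega
  · simp; omega

def solution_alt (my_string : String) : Int :=
  let toks := PySem.Str.split₀ my_string
  let pairs := pairUp toks.tail
  (PySem.Int.ofStr? (toks.headD "")).getD 0 + evPairs pairs   -- int(toks[0]) + ev(pairs)

-- ===== PRECONDITION & SPEC =====
-- Exactly the inputs where Python A returns: an odd number of whitespace-separated tokens
-- (so every operator has an operand and the list is nonempty) and every even-position token
-- parses as a Python int.  A places no constraint on the operator tokens (any non-"+" subtracts).
def Pre_solution (my_string : String) : Prop :=
  (PySem.Str.split₀ my_string).length % 2 = 1 ∧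
  ∀ i : Fin (PySem.Str.split₀ my_string).length,
    i.val % 2 = 0 → (PySem.Int.ofStr? ((PySem.Str.split₀ my_string)[i])).isSome = true
instance (my_string : String) : Decidable (Pre_solution my_string) := by
  unfold Pre_solution; infer_instance

def pvWitness_solution : String := "10 + 2 - 3"

def Spec_solution (my_string : String) (out : Int) : Prop := out = solution_alt my_string
instance (my_string : String) (out : Int) : Decidable (Spec_solution my_string out) := by
  unfold Spec_solution; infer_instance

-- ===== CLAIM (what is proved, stated in full; the proofs are below) =====
def Claim_equal_solution : Prop := ∀ (my_string : String), Dom_solution my_string → Pre_solution my_string → Spec_solution my_string (solution my_string)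

-- ===== LEMMAS AND PROOFS =====

-- the signed value of one (operator, operand) pair
def signedVal (p : String × String) : Int :=
  if p.1 = "+" then (PySem.Int.ofStr? p.2).getD 0 else -((PySem.Int.ofStr? p.2).getD 0)

-- proof-side forward pairwise recursion: a middle form between A's fold and B's D&C
def goF (total : Int) : List String → Int
  | [] => total
  | [_] => total
  | op :: num :: rest =>
      goF (total + (if op = "+" then (PySem.Int.ofStr? num).getD 0 else -((PySem.Int.ofStr? num).getD 0))) rest

lemma pyRange02 (n : Nat) :
    PySem.List.pyRange 0 ((n : Int) + 2) 2 = 0 :: (PySem.List.pyRange 0 (n : Int) 2).map (· + 2) := by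
  rw [PySem.List.pyRange_of_pos 0 ((n : Int) + 2) (by norm_num),
      PySem.List.pyRange_of_pos 0 (n : Int) (by norm_num)]
  have h2 : (if (0:Int) < (n:Int) + 2 then (((n:Int) + 2 - 0 + 2 - 1) / 2).toNat else 0)
      = (if (0:Int) < (n:Int) then (((n:Int) - 0 + 2 - 1) / 2).toNat else 0) + 1 := by
    split_ifs <;> omega
  rw [h2, List.range_succ_eq_map, List.map_cons, List.map_map, List.map_map]
  congr 1

lemma pyGetD_shift (x : String) (l : List String) (i : Int) (d : String) (h : 0 ≤ i) :
    PySem.List.pyGetD (x :: l) (i + 1) d = PySem.List.pyGetD l i d := by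
  rw [PySem.List.pyGetD_of_nonneg (x :: l) d (by omega), PySem.List.pyGetD_of_nonneg l d h]
  have ht : (i + 1).toNat = i.toNat + 1 := by omega
  rw [ht, List.getD_cons_succ]

-- A's stride-2 index loop over the post-pop token list computes the forward pairwise recursion
lemma loop_eq_goF (total : Int) (l : List String) :
    (PySem.List.pyRange 0 (l.length : Int) 2).foldl
      (fun sum_ i =>
        if PySem.List.pyGetD l i "" = "+" then
          sum_ + (PySem.Int.ofStr? (PySem.List.pyGetD l (i + 1) "")).getD 0
        else
          sum_ - (PySem.Int.ofStr? (PySem.List.pyGetD l (i + 1) "")).getD 0)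
      total
    = goF total l := by
  induction total, l using goF.induct with
  | case1 total =>
      rw [show ((([] : List String)).length : Int) = 0 by simp,
          show PySem.List.pyRange 0 0 2 = ([] : List Int) by decide]
      rfl
  | case2 total op =>
      -- one iteration i = 0; the out-of-range operand s_list[1] reads the default "" whose
      -- int-value 0 is added or subtracted — a no-op (this case is outside Pre_solution anyway)
      rw [show (([op] : List String).length : Int) = (1 : Int) by simp,
          show PySem.List.pyRange 0 1 2 = [0] by decide]
      simp only [List.foldl_cons, List.foldl_nil, goF]
      have h1 : PySem.List.pyGetD [op] ((0:Int) + 1) "" = "" := by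
        rw [PySem.List.pyGetD_of_nonneg _ _ (by omega)]; rfl
      have h0 : (PySem.Int.ofStr? "").getD 0 = (0 : Int) := by decide
      rw [h1, h0]
      split_ifs <;> ring
  | case3 total op num rest ih =>
      rw [show ((op :: num :: rest).length : Int) = (rest.length : Int) + 2 by simp; omega,
          pyRange02, List.foldl_cons, List.foldl_map]
      have h0 : PySem.List.pyGetD (op :: num :: rest) 0 "" = op := PySem.List.pyGetD_zero_cons _ _ _
      have h1 : PySem.List.pyGetD (op :: num :: rest) ((0:Int) + 1) "" = num := by
        rw [pyGetD_shift _ _ 0 _ (le_refl 0), PySem.List.pyGetD_zero_cons]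
      rw [PySem.List.foldl_congr_mem _ _
        (fun sum_ i =>
          if PySem.List.pyGetD rest i "" = "+" then
            sum_ + (PySem.Int.ofStr? (PySem.List.pyGetD rest (i + 1) "")).getD 0
          else
            sum_ - (PySem.Int.ofStr? (PySem.List.pyGetD rest (i + 1) "")).getD 0) _ ?_]
      · rw [h0, h1]
        have hstart : (if op = "+" then total + (PySem.Int.ofStr? num).getD 0
              else total - (PySem.Int.ofStr? num).getD 0)
            = total + (if op = "+" then (PySem.Int.ofStr? num).getD 0
              else -((PySem.Int.ofStr? num).getD 0)) := by
          split_ifs <;> ring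
        simp only [goF]
        rw [hstart] at *
        exact ih
      · intro acc x hx
        have hx0 : 0 ≤ x := ((PySem.List.mem_pyRange_iff_of_pos (by norm_num) x).mp hx).1
        have e1 : PySem.List.pyGetD (op :: num :: rest) (x + 2) "" = PySem.List.pyGetD rest x "" := by
          rw [show x + 2 = (x + 1) + 1 by ring,
              pyGetD_shift _ _ (x+1) _ (by omega), pyGetD_shift _ _ x _ hx0]
        have e2 : PySem.List.pyGetD (op :: num :: rest) (x + 2 + 1) "" = PySem.List.pyGetD rest (x + 1) "" := by
          rw [show x + 2 + 1 = ((x + 1) + 1) + 1 by ring,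
              pyGetD_shift _ _ ((x+1)+1) _ (by omega), pyGetD_shift _ _ (x+1) _ (by omega)]
        rw [e1, e2]

-- B's divide-and-conquer evaluates the sum of the signed pair values (order is immaterial: + on Int)
lemma evPairs_eq_sum (ps : List (String × String)) :
    evPairs ps = (ps.map signedVal).sum := by
  induction ps using evPairs.induct with
  | case1 => simp [evPairs]
  | case2 num => simp [evPairs, signedVal]
  | case3 op num h => simp [evPairs, signedVal, h]
  | case4 p q r ps mid ih1 ih2 =>
      rw [evPairs, ih1, ih2, ← List.sum_append, ← List.map_append, List.take_append_drop]

-- the forward pairwise recursion is the head value plus the sum over the zipped pairs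
lemma goF_eq_sum (total : Int) (l : List String) :
    goF total l = total + ((pairUp l).map signedVal).sum := by
  induction total, l using goF.induct with
  | case1 total => simp [goF, pairUp]
  | case2 total op => simp [goF, pairUp]
  | case3 total op num rest ih =>
      rw [goF, ih, pairUp]
      simp [signedVal]
      ring

-- ===== VERDICT (by name: the statement is the Claim_ definition above) =====
theorem solution_spec : Claim_equal_solution := by
  intro s _hd _hp
  show solution s = solution_alt s
  simp only [solution, solution_alt]
  rw [loop_eq_goF, goF_eq_sum, evPairs_eq_sum]
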